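-- pv_equiv track=rewrite | github.com/Shoma-DS/team-info | .agent/skills/viral-template-generator/scripts/split_subtitles.py | _pack_card_texts
-- ===== SOURCE A (Python) =====
-- def _pack_card_texts(chunks: list[str], line_max: int, max_lines: int) -> list[str]:
--     cards: list[str] = []
--     current_lines: list[str] = []
--
--     for raw_chunk in chunks:
--         chunk = raw_chunk.strip()
--         if not chunk:
--             continue
--
--         if not current_lines:
--             current_lines = [chunk]
--             continue
--
--         last_line = current_lines[-1]
--         if len(last_line) + len(chunk) <= line_max:
--             current_lines[-1] = last_line + chunk
--             continue
--
--         if len(current_lines) < max_lines: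
--             current_lines.append(chunk)
--             continue
--
--         cards.append("\n".join(current_lines))
--         current_lines = [chunk]
--
--     if current_lines:
--         cards.append("\n".join(current_lines))
--
--     return cards or [""]
-- ===== SOURCE B (Python) =====
-- def _pack_card_texts(chunks: list[str], line_max: int, max_lines: int) -> list[str]:
--     # Pass 1: greedily pack stripped chunks into a flat list of lines.
--     lines: list[str] = []
--     for raw_chunk in chunks:
--         chunk = raw_chunk.strip()
--         if not chunk:
--             continue
--         if lines and len(lines[-1]) + len(chunk) <= line_max:
--             lines[-1] = lines[-1] + chunk
--         else:
--             lines.append(chunk)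
--     # Pass 2: group the lines into cards of at most `step` lines each.
--     step = max_lines if max_lines >= 1 else 1
--     cards: list[str] = []
--     while lines:
--         cards.append("\n".join(lines[:step]))
--         lines = lines[step:]
--     return cards or [""]
-- ===== Notes on version B (the rewrite author's own statement) =====
-- stated objective: alternative
-- what changed: Replaced A's single stateful loop (open card buffer with inline flushes) by two separate passes: first greedily pack all stripped chunks into a flat list of lines, then group that list into cards of max_lines lines each.
import Mathlib
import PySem

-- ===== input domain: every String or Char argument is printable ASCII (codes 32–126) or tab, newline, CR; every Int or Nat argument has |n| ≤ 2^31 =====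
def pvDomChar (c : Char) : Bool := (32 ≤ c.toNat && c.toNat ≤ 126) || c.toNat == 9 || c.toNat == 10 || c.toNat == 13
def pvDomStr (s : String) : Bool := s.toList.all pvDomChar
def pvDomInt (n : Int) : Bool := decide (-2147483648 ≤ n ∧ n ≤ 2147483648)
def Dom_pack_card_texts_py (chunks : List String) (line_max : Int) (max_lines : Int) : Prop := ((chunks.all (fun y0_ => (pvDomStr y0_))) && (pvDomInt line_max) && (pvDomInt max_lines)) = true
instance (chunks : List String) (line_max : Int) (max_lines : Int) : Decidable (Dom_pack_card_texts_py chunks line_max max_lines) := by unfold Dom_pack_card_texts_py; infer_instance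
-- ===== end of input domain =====

-- B splits A's single stateful loop into two passes (greedy line packing, then grouping lines
-- into cards of `max_lines`); same return value, no speed claim (objective: alternative).

-- ===== PORT A =====
-- the for-loop of A: state is (cards, current_lines); branches in the Python order.
-- `current_lines[-1]` is ported as `getLastD ""`, exact because that branch has current_lines ≠ [].
def packA_go (line_max max_lines : Int) : List String → List String × List String → List String × List String
  | [], st => st
  | raw :: rest, (cards, cur) =>
      let chunk := PySem.Str.strip raw
      if chunk = "" then packA_go line_max max_lines rest (cards, cur)
      else if cur = [] then packA_go line_max max_lines rest (cards, [chunk])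
      else
        let last := cur.getLastD ""
        if PySem.Str.len last + PySem.Str.len chunk ≤ line_max then
          packA_go line_max max_lines rest (cards, cur.dropLast ++ [last ++ chunk])
        else if (cur.length : Int) < max_lines then
          packA_go line_max max_lines rest (cards, cur ++ [chunk])
        else
          packA_go line_max max_lines rest (cards ++ [PySem.Str.join "\n" cur], [chunk])

def pack_card_texts_py (chunks : List String) (line_max : Int) (max_lines : Int) : List String :=
  let st := packA_go line_max max_lines chunks ([], [])
  let cards := if st.2 = [] then st.1 else st.1 ++ [PySem.Str.join "\n" st.2]
  if cards = [] then [""] else cards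

-- ===== PORT B =====
-- pass 1 of B: greedily merge stripped chunks into a flat list of lines.
def packB_lines (line_max : Int) : List String → List String → List String
  | [], lines => lines
  | raw :: rest, lines =>
      let chunk := PySem.Str.strip raw
      if chunk = "" then packB_lines line_max rest lines
      else if lines ≠ [] ∧ PySem.Str.len (lines.getLastD "") + PySem.Str.len chunk ≤ line_max then
        packB_lines line_max rest (lines.dropLast ++ [lines.getLastD "" ++ chunk])
      else
        packB_lines line_max rest (lines ++ [chunk])

-- step = max_lines if max_lines >= 1 else 1  (as a Nat; exact since the value is ≥ 1)
def packB_step (max_lines : Int) : Nat := if 1 ≤ max_lines then max_lines.toNat else 1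

theorem packB_step_pos (max_lines : Int) : 1 ≤ packB_step max_lines := by
  unfold packB_step; split <;> omega

-- pass 2 of B: the while-loop `cards.append(join(lines[:step])); lines = lines[step:]`
def packB_group (step : Nat) (hstep : 1 ≤ step) (lines : List String) : List String :=
  if _h : lines = [] then []
  else PySem.Str.join "\n" (lines.take step) :: packB_group step hstep (lines.drop step)
termination_by lines.length
decreasing_by
  simp only [List.length_drop]
  have : lines.length ≠ 0 := fun h0 => _h (List.eq_nil_of_length_eq_zero h0)
  omega

def pack_card_texts_py_alt (chunks : List String) (line_max : Int) (max_lines : Int) : List String :=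
  let lines := packB_lines line_max chunks []
  let cards := packB_group (packB_step max_lines) (packB_step_pos max_lines) lines
  if cards = [] then [""] else cards

-- ===== PRECONDITION & SPEC =====
def Spec_pack_card_texts_py (chunks : List String) (line_max : Int) (max_lines : Int) (out : List String) : Prop := out = pack_card_texts_py_alt chunks line_max max_lines
instance (chunks : List String) (line_max : Int) (max_lines : Int) (out : List String) : Decidable (Spec_pack_card_texts_py chunks line_max max_lines out) := by unfold Spec_pack_card_texts_py; infer_instance

-- ===== CLAIM (what is proved, stated in full; the proofs are below) =====
def Claim_equal_pack_card_texts_py : Prop := ∀ (chunks : List String) (line_max : Int) (max_lines : Int), Dom_pack_card_texts_py chunks line_max max_lines → Spec_pack_card_texts_py chunks line_max max_lines (pack_card_texts_py chunks line_max max_lines)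

-- ===== LEMMAS AND PROOFS =====

-- A's flush step, expressed on A's final state.
def packFinish (st : List String × List String) : List String :=
  if st.2 = [] then st.1 else st.1 ++ [PySem.Str.join "\n" st.2]

theorem getLastD_append_of_ne_nil {xs ys : List String} (h : ys ≠ []) (d : String) :
    (xs ++ ys).getLastD d = ys.getLastD d := by
  simp [List.getLastD_eq_getLast?, List.getLast?_append_of_ne_nil _ h]

-- pass 1 only ever touches the LAST line, so a nonempty suffix of the line list can be
-- processed independently of the lines already packed before it.
theorem packB_lines_append (line_max : Int) (rest : List String) :
    ∀ (xs ys : List String), ys ≠ [] →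
      packB_lines line_max rest (xs ++ ys) = xs ++ packB_lines line_max rest ys := by
  induction rest with
  | nil => intro xs ys _; rfl
  | cons raw rest ih =>
      intro xs ys hys
      simp only [packB_lines]
      by_cases hc : PySem.Str.strip raw = ""
      · simp only [hc]; exact ih xs ys hys
      · rw [if_neg hc, if_neg hc]
        rw [getLastD_append_of_ne_nil hys]
        have hne : xs ++ ys ≠ [] := fun h => hys (List.eq_nil_of_append_eq_nil h).2
        by_cases hm : PySem.Str.len (ys.getLastD "") + PySem.Str.len (PySem.Str.strip raw) ≤ line_max
        · rw [if_pos ⟨hne, hm⟩, if_pos ⟨hys, hm⟩]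
          rw [List.dropLast_append_of_ne_nil hys, List.append_assoc]
          exact ih xs (ys.dropLast ++ [ys.getLastD "" ++ PySem.Str.strip raw]) (by simp)
        · rw [if_neg (fun h => hm h.2), if_neg (fun h => hm h.2)]
          rw [List.append_assoc]
          exact ih xs (ys ++ [PySem.Str.strip raw]) (by simp)

-- grouping a list that starts with a full group of exactly `step` lines
theorem packB_group_full (step : Nat) (hstep : 1 ≤ step) (cur tail : List String)
    (hcur : cur ≠ []) (hlen : cur.length = step) :
    packB_group step hstep (cur ++ tail) =
      PySem.Str.join "\n" cur :: packB_group step hstep tail := by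
  have ht : (cur ++ tail).take step = cur := List.take_left' hlen
  have hd : (cur ++ tail).drop step = tail := List.drop_left' hlen
  rw [packB_group, dif_neg (fun h => hcur (List.eq_nil_of_append_eq_nil h).1), ht, hd]

-- main loop invariant: A's loop (followed by the final flush) computes B's grouped lines,
-- for any starting state whose open card has at most `step` lines.
theorem packA_packB (line_max max_lines : Int) (rest : List String) :
    ∀ (cards cur : List String), cur.length ≤ packB_step max_lines →
      packFinish (packA_go line_max max_lines rest (cards, cur)) =
        cards ++ packB_group (packB_step max_lines) (packB_step_pos max_lines)
                  (packB_lines line_max rest cur) := by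
  induction rest with
  | nil =>
      intro cards cur hlen
      simp only [packA_go, packB_lines, packFinish]
      by_cases h : cur = []
      · subst h; rw [if_pos rfl, packB_group, dif_pos rfl, List.append_nil]
      · rw [if_neg h, packB_group, dif_neg h,
          List.take_of_length_le hlen, List.drop_eq_nil_of_le hlen,
          packB_group, dif_pos rfl]
  | cons raw rest ih =>
      intro cards cur hlen
      simp only [packA_go, packB_lines]
      by_cases hc : PySem.Str.strip raw = ""
      · simp only [hc]; exact ih cards cur hlen
      · rw [if_neg hc, if_neg hc]
        by_cases h0 : cur = []
        · subst h0
          rw [if_pos rfl, if_neg (fun h => h.1 rfl)]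
          exact ih cards [PySem.Str.strip raw] (packB_step_pos max_lines)
        · rw [if_neg h0]
          by_cases hm : PySem.Str.len (cur.getLastD "") + PySem.Str.len (PySem.Str.strip raw) ≤ line_max
          · rw [if_pos hm, if_pos ⟨h0, hm⟩]
            exact ih cards _ (by
              rw [List.length_append, List.length_dropLast]
              have : cur.length ≠ 0 := fun h => h0 (List.eq_nil_of_length_eq_zero h)
              simpa using by omega)
          · have hB : ¬(cur ≠ [] ∧ PySem.Str.len (cur.getLastD "") + PySem.Str.len (PySem.Str.strip raw) ≤ line_max) := fun h => hm h.2
            rw [if_neg hm, if_neg hB]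
            by_cases hl : (cur.length : Int) < max_lines
            · rw [if_pos hl]
              have hfit : (cur ++ [PySem.Str.strip raw]).length ≤ packB_step max_lines := by
                simp only [List.length_append, List.length_cons, List.length_nil]
                unfold packB_step
                split <;> omega
              exact ih cards (cur ++ [PySem.Str.strip raw]) hfit
            · rw [if_neg hl]
              have hfull : cur.length = packB_step max_lines := by
                have h1 : 1 ≤ cur.length := by
                  have : cur.length ≠ 0 := fun h => h0 (List.eq_nil_of_length_eq_zero h)
                  omega
                revert hlen hl; unfold packB_step; split <;> (intro hlen hl; omega)
              rw [packB_lines_append line_max rest cur [PySem.Str.strip raw] (by simp),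
                packB_group_full _ _ cur _ h0 hfull]
              rw [ih (cards ++ [PySem.Str.join "\n" cur]) [PySem.Str.strip raw]
                    (packB_step_pos max_lines)]
              simp

-- ===== VERDICT (by name: the statement is the Claim_ definition above) =====
theorem pack_card_texts_py_spec : Claim_equal_pack_card_texts_py := by
  intro chunks line_max max_lines _
  unfold Spec_pack_card_texts_py pack_card_texts_py pack_card_texts_py_alt
  have h := packA_packB line_max max_lines chunks [] [] (by simp)
  simp only [packFinish] at h
  simp only [h, List.nil_append]
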